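-- pv_equiv track=rewrite | github.com/mbaljko/vault-grading-pipeline | 01_units/pipelines/PPS2_assembly/python/generate_json_reports.py | build_file_count_analysis
-- ===== SOURCE A (Python) =====
-- from collections import defaultdict
--
-- def build_file_count_analysis(records: list[dict[str, object]]) -> list[str]:
--     counts_by_pool: dict[str, int] = defaultdict(int)
--     for record in records:
--         student_pool = str(record.get("student_pool") or "")
--         if student_pool:
--             counts_by_pool[student_pool] += 1
--
--     lines = [
--         "## File Count",
--         "",
--         "### All data",
--         "",
--         f"- Number of files: {len(records)}",
--     ]
--
--     for student_pool in sorted(counts_by_pool):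
--         lines.extend(
--             [
--                 "",
--                 f"### {student_pool}",
--                 "",
--                 f"- Number of files: {counts_by_pool[student_pool]}",
--             ]
--         )
--
--     return lines
-- ===== SOURCE B (Python) =====
-- def build_file_count_analysis(records: list[dict[str, object]]) -> list[str]:
--     lines = [
--         "## File Count",
--         "",
--         "### All data",
--         "",
--         f"- Number of files: {len(records)}",
--     ]
--     keys = sorted(str(r.get("student_pool") or "") for r in records)
--     i = 0
--     while i < len(keys):
--         j = i + 1
--         while j < len(keys) and keys[j] == keys[i]:
--             j += 1
--         if keys[i]:
--             lines.extend(["", f"### {keys[i]}", "", f"- Number of files: {j - i}"])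
--         i = j
--     return lines
-- ===== Notes on version B (the rewrite author's own statement) =====
-- stated objective: alternative
-- what changed: Replaces the dict counter with a sort-then-group scan: the pool keys are sorted and a single forward pass counts each run of equal keys, emitting a report block per non-empty run.
import Mathlib
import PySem

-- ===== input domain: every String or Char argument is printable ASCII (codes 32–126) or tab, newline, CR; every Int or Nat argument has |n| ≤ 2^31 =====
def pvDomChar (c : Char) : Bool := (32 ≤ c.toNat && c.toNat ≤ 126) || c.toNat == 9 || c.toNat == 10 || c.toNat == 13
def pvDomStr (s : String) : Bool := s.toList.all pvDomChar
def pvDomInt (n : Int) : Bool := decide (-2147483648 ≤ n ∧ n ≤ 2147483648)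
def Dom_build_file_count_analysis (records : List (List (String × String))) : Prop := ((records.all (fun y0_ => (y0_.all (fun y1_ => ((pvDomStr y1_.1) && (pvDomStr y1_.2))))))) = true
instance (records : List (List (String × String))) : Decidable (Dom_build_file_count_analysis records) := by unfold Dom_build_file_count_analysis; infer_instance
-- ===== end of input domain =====

-- B replaces A's dict counter by a sort-then-group scan: one forward pass over the sorted pool keys counting each run (alternative decomposition, same cost class).

-- ===== PORT A =====
def build_file_count_analysis (records : List (List (String × String))) : List String :=
  let counts : PySem.Dict String Int :=
    records.foldl (fun d record =>
      -- str(record.get("student_pool") or ""): values are strings, so `or ""` collapses a missing key and "" to ""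
      let sp := (PySem.Dict.mk record).getD "student_pool" ""
      if sp ≠ "" then d.modify sp 0 (· + 1) else d) PySem.Dict.empty
  let lines : List String := ["## File Count", "", "### All data", "",
    "- Number of files: " ++ PySem.Int.toStr (records.length : Int)]
  (PySem.List.sorted counts.keys (fun x => x) false).foldl
    (fun ls sp => ls ++ ["", "### " ++ sp, "", "- Number of files: " ++ PySem.Int.toStr (counts.getD sp 0)]) lines

-- ===== PORT B =====
-- Source B's key function: str(r.get("student_pool") or "") (values are strings, so `or ""` collapses a missing key and "" to "")
def pvPoolKey (r : List (String × String)) : String :=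
  (PySem.Dict.mk r).getD "student_pool" ""

-- Source B's forward run scan over the sorted key list: the inner `while keys[j] == keys[i]` advance
-- is exactly takeWhile/dropWhile on the remainder; the run count is j - i = 1 + length of that run.
def pvRuns : List String → List (String × Int)
  | [] => []
  | x :: t =>
      (x, ((t.takeWhile (fun y => y == x)).length : Int) + 1) :: pvRuns (t.dropWhile (fun y => y == x))
termination_by l => l.length
decreasing_by
  simpa using Nat.lt_succ_of_le (List.Sublist.length_le (List.dropWhile_sublist _))

def build_file_count_analysis_alt (records : List (List (String × String))) : List String :=
  let lines : List String := ["## File Count", "", "### All data", "",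
    "- Number of files: " ++ PySem.Int.toStr (records.length : Int)]
  let keys := PySem.List.sorted (records.map pvPoolKey) (fun x => x) false
  (pvRuns keys).foldl
    (fun ls p =>
      if p.1 ≠ "" then ls ++ ["", "### " ++ p.1, "", "- Number of files: " ++ PySem.Int.toStr p.2] else ls)
    lines

-- ===== PRECONDITION & SPEC =====
def Spec_build_file_count_analysis (records : List (List (String × String))) (out : List String) : Prop := out = build_file_count_analysis_alt records
instance (records : List (List (String × String))) (out : List String) : Decidable (Spec_build_file_count_analysis records out) := by unfold Spec_build_file_count_analysis; infer_instance

-- ===== CLAIM (what is proved, stated in full; the proofs are below) =====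
def Claim_equal_build_file_count_analysis : Prop := ∀ (records : List (List (String × String))), Dom_build_file_count_analysis records → Spec_build_file_count_analysis records (build_file_count_analysis records)

-- ===== LEMMAS AND PROOFS =====

-- the fixed per-pool block
def pvBlk (k : String) (n : Int) : List String :=
  ["", "### " ++ k, "", "- Number of files: " ++ PySem.Int.toStr n]

-- the fixed header
def pvHeader (records : List (List (String × String))) : List String :=
  ["## File Count", "", "### All data", "", "- Number of files: " ++ PySem.Int.toStr (records.length : Int)]

lemma pv_foldl_add_prefix (l : List String) : ∀ (s : List String),
    ∃ u, List.foldl PySem.Set.add s l = s ++ u ∧ u.Sublist l := by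
  induction l with
  | nil => intro s; exact ⟨[], by simp⟩
  | cons x t ih =>
    intro s
    by_cases h : x ∈ s
    · obtain ⟨u, hu, hsub⟩ := ih s
      refine ⟨u, ?_, hsub.cons _⟩
      simpa [PySem.Set.add, PySem.Set.contains, h] using hu
    · obtain ⟨u, hu, hsub⟩ := ih (s ++ [x])
      refine ⟨x :: u, ?_, hsub.cons₂ _⟩
      simp only [List.foldl_cons, PySem.Set.add, PySem.Set.contains]
      rw [if_neg (by simpa using h)]
      simpa using hu

lemma pv_ofList_sublist (l : List String) : (PySem.Set.ofList l).Sublist l := by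
  obtain ⟨u, hu, hsub⟩ := pv_foldl_add_prefix l []
  simpa [PySem.Set.ofList, hu] using hsub

lemma pv_foldl_add_cons_of_ne (l : List String) (x : String) (h : ∀ y ∈ l, y ≠ x) :
    ∀ s, List.foldl PySem.Set.add (x :: s) l = x :: List.foldl PySem.Set.add s l := by
  induction l with
  | nil => intro s; rfl
  | cons y t ih =>
    intro s
    have hyx : y ≠ x := h y (by simp)
    have hcont : PySem.Set.contains (x :: s) y = PySem.Set.contains s y := by
      simp [PySem.Set.contains, hyx]
    simp only [List.foldl_cons, PySem.Set.add, hcont]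
    by_cases hc : PySem.Set.contains s y = true
    · simp only [hc, if_true]
      exact ih (fun z hz => h z (by simp [hz])) s
    · simp only [hc]
      have := ih (fun z hz => h z (by simp [hz])) (s ++ [y])
      simpa using this

-- Set.ofList collapses a leading run of equal elements onto the head
lemma pv_ofList_run (x : String) (tw dw : List String)
    (htw : ∀ y ∈ tw, y = x) (hdw : ∀ y ∈ dw, y ≠ x) :
    PySem.Set.ofList (x :: (tw ++ dw)) = x :: PySem.Set.ofList dw := by
  have h1 : List.foldl PySem.Set.add [x] tw = [x] := by
    induction tw with
    | nil => rfl
    | cons y t ih =>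
      have hy : y = x := htw y (by simp)
      subst hy
      simp only [List.foldl_cons, PySem.Set.add, PySem.Set.contains]
      simpa using ih (fun z hz => htw z (by simp [hz]))
  show List.foldl PySem.Set.add (PySem.Set.add [] x) (tw ++ dw) = x :: PySem.Set.ofList dw
  rw [show PySem.Set.add ([] : List String) x = [x] from rfl, List.foldl_append, h1]
  simpa [PySem.Set.ofList] using pv_foldl_add_cons_of_ne dw x hdw []

-- forward run scan of a sorted list = distinct elements with multiplicities
lemma pv_runs_char : ∀ (s : List String), s.Pairwise (· ≤ ·) →
    pvRuns s = (PySem.Set.ofList s).map (fun k => (k, (s.count k : Int))) := by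
  intro s
  induction s using pvRuns.induct with
  | case1 => intro _; rw [pvRuns]; rfl
  | case2 x t ih =>
    intro hp
    have hpc := List.pairwise_cons.mp hp
    set tw := t.takeWhile (fun y => y == x) with htwdef
    set dw := t.dropWhile (fun y => y == x) with hdwdef
    have hsplit : t = tw ++ dw := (List.takeWhile_append_dropWhile).symm
    have htw : ∀ y ∈ tw, y = x := by
      intro y hy
      have := List.mem_takeWhile_imp hy
      simpa using this
    have hdw : ∀ y ∈ dw, y ≠ x := by
      intro y hy hyx
      subst hyx
      -- head of dw is ≠ y and ≤ y, and ≥ y since it is in t after x; contradiction via pairwise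
      cases hd : dw with
      | nil => rw [hd] at hy; simp at hy
      | cons z zs =>
        have hz_ne : ¬ (z == y) = true := by
          have := List.head?_dropWhile_not (p := fun w => w == y) t
          rw [← hdwdef, hd] at this
          simpa using this
        rcases (by rw [hd] at hy; simpa using hy : y = z ∨ y ∈ zs) with h | h
        · exact hz_ne (by simp [h])
        · -- z ≤ y (pairwise within dw, a sublist of t) and y ≤ z would be needed; derive y ≤ z from x ≤ z and y = x? here y is the head x
          -- pairwise on x :: t gives x ≤ z; pairwise on t restricted to dw gives z ≤ y; with y = x get z = x, contra
          have hzt : z ∈ t := by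
            rw [hsplit, hd]; simp
          have hxz : y ≤ z := hpc.1 z hzt
          have hdw_pair : (z :: zs).Pairwise (· ≤ ·) := by
            rw [← hd, hdwdef]
            exact List.Pairwise.sublist (List.dropWhile_sublist _) hpc.2
          have hzy : z ≤ y := (List.pairwise_cons.mp hdw_pair).1 y h
          exact hz_ne (by simp [le_antisymm hzy hxz])
    have hdw_pair : dw.Pairwise (· ≤ ·) :=
      List.Pairwise.sublist (List.dropWhile_sublist _) hpc.2
    have hofl : PySem.Set.ofList (x :: t) = x :: PySem.Set.ofList dw := by
      rw [hsplit] at *; exact pv_ofList_run x tw dw htw hdw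
    have hcount_x : ((x :: t).count x : Int) = (tw.length : Int) + 1 := by
      have h0 : dw.count x = 0 := List.count_eq_zero_of_not_mem (fun h => hdw x h rfl)
      have h1 : tw.count x = tw.length := by
        rw [List.count_eq_length]
        intro y hy; simp [htw y hy]
      rw [List.count_cons_self, hsplit, List.count_append, h0, h1]
      push_cast; ring
    rw [pvRuns, hofl, List.map_cons, ← hcount_x]
    congr 1
    rw [ih hdw_pair]
    apply List.map_congr_left
    intro a ha
    have hadw : a ∈ dw := (PySem.Set.mem_ofList dw a).mp ha
    have hax : a ≠ x := hdw a hadw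
    have htw0 : tw.count a = 0 :=
      List.count_eq_zero_of_not_mem (fun h => hax (htw a h))
    rw [hsplit, List.count_cons_of_ne (Ne.symm hax), List.count_append, htw0]
    simp

-- normal form of port A: header ++ blocks over the sorted distinct nonempty keys, counted in the filtered key list
lemma pv_A_norm (records : List (List (String × String))) :
    build_file_count_analysis records
      = pvHeader records ++
        (PySem.List.sorted (PySem.Set.ofList ((records.map pvPoolKey).filter (fun x => decide (x ≠ ""))))
            (fun x => x) false).flatMap
          (fun k => pvBlk k (((records.map pvPoolKey).filter (fun x => decide (x ≠ ""))).count k : Int)) := by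
  unfold build_file_count_analysis
  simp only []
  rw [show (fun (d : PySem.Dict String Int) (record : List (String × String)) =>
        let sp := (PySem.Dict.mk record).getD "student_pool" ""
        if sp ≠ "" then d.modify sp 0 (· + 1) else d)
      = (fun d record => if pvPoolKey record ≠ "" then d.modify (pvPoolKey record) 0 (· + 1) else d) from rfl]
  rw [← List.foldl_map (f := pvPoolKey)
      (g := fun (d : PySem.Dict String Int) sp => if sp ≠ "" then d.modify sp 0 (· + 1) else d)]
  rw [PySem.List.foldl_ite_eq_foldl_filter (p := fun sp => sp ≠ "")
      (f := fun (d : PySem.Dict String Int) sp => d.modify sp 0 (· + 1))]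
  rw [← PySem.Dict.counter_eq_foldl]
  rw [PySem.Dict.keys_counter]
  rw [PySem.List.foldl_append_eq_flatMap]
  simp only [PySem.Dict.getD_counter]
  rfl

-- normal form of port B: header ++ blocks from the run scan of the sorted key list
lemma pv_B_norm (records : List (List (String × String))) :
    build_file_count_analysis_alt records
      = pvHeader records ++
        (pvRuns (PySem.List.sorted (records.map pvPoolKey) (fun x => x) false)).flatMap
          (fun p => if p.1 ≠ "" then pvBlk p.1 p.2 else []) := by
  unfold build_file_count_analysis_alt
  simp only []
  have hbody : (fun (ls : List String) (p : String × Int) =>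
      if p.1 ≠ "" then ls ++ ["", "### " ++ p.1, "", "- Number of files: " ++ PySem.Int.toStr p.2] else ls)
      = (fun ls p => ls ++ (if p.1 ≠ "" then pvBlk p.1 p.2 else [])) := by
    funext ls p
    split_ifs <;> simp [pvBlk]
  rw [hbody, PySem.List.foldl_append_eq_flatMap]
  rfl

-- A's sorted distinct filtered keys = the filtered distinct keys of the sorted key list
lemma pv_sorted_set_filter (ks : List String) :
    PySem.List.sorted (PySem.Set.ofList (ks.filter (fun x => decide (x ≠ "")))) (fun x => x) false
      = (PySem.Set.ofList (PySem.List.sorted ks (fun x => x) false)).filter (fun x => decide (x ≠ "")) := by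
  apply PySem.List.sorted_eq_of_perm_of_pairwise_lt
  · rw [List.perm_ext_iff_of_nodup
      (List.Nodup.filter _ (PySem.Set.nodup_ofList _)) (PySem.Set.nodup_ofList _)]
    intro a
    simp [List.mem_filter, PySem.Set.mem_ofList, PySem.List.mem_sorted, and_comm]
  · apply List.Pairwise.filter
    have hle : List.Pairwise (fun a b => a ≤ b)
        (PySem.Set.ofList (PySem.List.sorted ks (fun x => x) false)) :=
      List.Pairwise.sublist (pv_ofList_sublist _) (PySem.List.sorted_pairwise ks (fun x => x))
    have hne : List.Pairwise (fun (a b : String) => a ≠ b)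
        (PySem.Set.ofList (PySem.List.sorted ks (fun x => x) false)) :=
      PySem.Set.nodup_ofList _
    exact (hle.and hne).imp (fun h => lt_of_le_of_ne h.1 h.2)

lemma pv_flatMap_congr_mem {α β : Type} (l : List α) (f g : α → List β)
    (h : ∀ x ∈ l, f x = g x) : l.flatMap f = l.flatMap g := by
  induction l with
  | nil => rfl
  | cons x t ih =>
    simp only [List.flatMap_cons, h x (by simp), ih (fun z hz => h z (by simp [hz]))]

lemma pv_flatMap_filter_ite {α β : Type} (l : List α) (p : α → Prop) [DecidablePred p]
    (g : α → List β) :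
    (l.filter (fun x => decide (p x))).flatMap g = l.flatMap (fun x => if p x then g x else []) := by
  induction l with
  | nil => rfl
  | cons x t ih =>
    by_cases h : p x <;> simp [h, ih]

-- ===== VERDICT (by name: the statement is the Claim_ definition above) =====
theorem build_file_count_analysis_spec : Claim_equal_build_file_count_analysis := by
  intro records _
  unfold Spec_build_file_count_analysis
  rw [pv_A_norm, pv_B_norm]
  congr 1
  set ks := records.map pvPoolKey with hks
  set s := PySem.List.sorted ks (fun x => x) false with hs
  have hperm : s.Perm ks := PySem.List.sorted_perm ks (fun x => x) false
  rw [pv_runs_char s (PySem.List.sorted_pairwise ks (fun x => x)),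
      List.flatMap_map, pv_sorted_set_filter,
      pv_flatMap_filter_ite (PySem.Set.ofList s) (fun x => x ≠ "")
        (fun k => pvBlk k ((ks.filter (fun x => decide (x ≠ ""))).count k : Int))]
  apply pv_flatMap_congr_mem
  intro k _
  by_cases hk : k ≠ ""
  · rw [if_pos hk, if_pos hk]
    have h1 : (ks.filter (fun x => decide (x ≠ ""))).count k = ks.count k :=
      List.count_filter (by simpa using hk)
    rw [h1, hperm.count_eq k]
  · rw [if_neg hk, if_neg hk]
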